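-- pv_equiv track=rewrite | github.com/ldayton/Parable | src/parable/core/ast.py | _find_cmdsub_end
-- ===== SOURCE A (Python) =====
-- def _find_cmdsub_end(value: str, start: int) -> int:
--     """Find the end of a $(...) command substitution, handling case statements.
--
--     Starts after the opening $(. Returns position after the closing ).
--     """
--     depth = 1
--     i = start
--     in_single = False
--     in_double = False
--     case_depth = 0  # Track nested case statements
--     in_case_patterns = False  # After 'in' but before first ;; or esac
--     while i < len(value) and depth > 0:
--         c = value[i]
--         # Handle escapes
--         if c == "\\" and i + 1 < len(value) and not in_single:
--             i += 2
--             continue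
--         # Handle quotes
--         if c == "'" and not in_double:
--             in_single = not in_single
--             i += 1
--             continue
--         if c == '"' and not in_single:
--             in_double = not in_double
--             i += 1
--             continue
--         if in_single:
--             i += 1
--             continue
--         if in_double:
--             # Inside double quotes, $() command substitution is still active
--             if value[i : i + 2] == "$(" and value[i : i + 3] != "$((":
--                 # Recursively find end of nested command substitution
--                 j = _find_cmdsub_end(value, i + 2)
--                 i = j
--                 continue
--             # Skip other characters inside double quotes
--             i += 1
--             continue
--         # Check for 'case' keyword
--         if value[i : i + 4] == "case" and _is_word_boundary(value, i, 4):
--             case_depth += 1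
--             in_case_patterns = False
--             i += 4
--             continue
--         # Check for 'in' keyword (after case)
--         if case_depth > 0 and value[i : i + 2] == "in" and _is_word_boundary(value, i, 2):
--             in_case_patterns = True
--             i += 2
--             continue
--         # Check for 'esac' keyword
--         if value[i : i + 4] == "esac" and _is_word_boundary(value, i, 4):
--             if case_depth > 0:
--                 case_depth -= 1
--                 in_case_patterns = False
--             i += 4
--             continue
--         # Check for ';;' (end of case pattern, next pattern or esac follows)
--         if value[i : i + 2] == ";;":
--             i += 2
--             continue
--         # Handle parens
--         if c == "(":
--             depth += 1
--         elif c == ")":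
--             # In case patterns, ) after pattern name is not a grouping paren
--             if in_case_patterns and case_depth > 0:
--                 # This ) is a case pattern terminator, skip it
--                 pass
--             else:
--                 depth -= 1
--         i += 1
--     return i
--
-- def _is_word_boundary(s: str, pos: int, word_len: int) -> bool:
--     """Check if the word at pos is a standalone word (not part of larger word)."""
--     # Check character before
--     if pos > 0 and s[pos - 1].isalnum():
--         return False
--     # Check character after
--     end = pos + word_len
--     if end < len(s) and s[end].isalnum():
--         return False
--     return True
-- ===== SOURCE B (Python) =====
-- def _find_cmdsub_end(value: str, start: int) -> int:
--     """Find the end of a $(...) command substitution, handling case statements.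
--
--     Iterative rewrite: one loop, an explicit stack of suspended scanner states,
--     and a single quote-mode variable (0 = unquoted, 1 = single, 2 = double)
--     dispatched on at the top of the loop instead of per-branch flag tests.
--     """
--     n = len(value)
--     stack = []
--     depth, case_depth, patt = 1, 0, False
--     mode = 0
--     i = start
--     while True:
--         if i >= n or depth <= 0:
--             if not stack:
--                 return i
--             depth, case_depth, patt, mode = stack.pop()
--             continue
--         c = value[i]
--         if mode == 1:
--             if c == "'":
--                 mode = 0
--             i += 1
--         elif mode == 2:
--             if c == '"':
--                 mode = 0
--                 i += 1
--             elif c == "\\" and i + 1 < n: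
--                 i += 2
--             elif _lookahead(value, i, "$(") and not _lookahead(value, i, "$(("):
--                 # suspend this scan, start a fresh one after the "$("
--                 stack.append((depth, case_depth, patt, mode))
--                 depth, case_depth, patt, mode = 1, 0, False, 0
--                 i += 2
--             else:
--                 i += 1
--         elif c == "\\" and i + 1 < n:
--             i += 2
--         elif c == "'":
--             mode = 1
--             i += 1
--         elif c == '"':
--             mode = 2
--             i += 1
--         elif _kw(value, i, "case"):
--             case_depth += 1
--             patt = False
--             i += 4
--         elif case_depth > 0 and _kw(value, i, "in"):
--             patt = True
--             i += 2
--         elif _kw(value, i, "esac"):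
--             if case_depth > 0:
--                 case_depth -= 1
--                 patt = False
--             i += 4
--         elif _lookahead(value, i, ";;"):
--             i += 2
--         elif c == "(":
--             depth += 1
--             i += 1
--         elif c == ")":
--             if not (patt and case_depth > 0):
--                 depth -= 1
--             i += 1
--         else:
--             i += 1
--
--
-- def _lookahead(value, i, s):
--     """Does the text at position i read exactly `s`?"""
--     return value[i:i + len(s)] == s
--
--
-- def _kw(value, i, word):
--     """Standalone keyword `word` at position i?"""
--     return _lookahead(value, i, word) and _is_word_boundary(value, i, len(word))
--
--
-- def _is_word_boundary(s: str, pos: int, word_len: int) -> bool: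
--     """Check if the word at pos is a standalone word (not part of larger word)."""
--     end = pos + word_len
--     return not (pos > 0 and s[pos - 1].isalnum()) and not (end < len(s) and s[end].isalnum())
-- ===== Notes on version B (the rewrite author's own statement) =====
-- stated objective: alternative
-- what changed: The recursive scanner is replaced by one iterative loop with an explicit stack of suspended scanner states, a single quote-mode variable (unquoted/single/double) dispatched at the top of the loop instead of two boolean flags tested per branch, and a shared keyword helper.
import Mathlib
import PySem

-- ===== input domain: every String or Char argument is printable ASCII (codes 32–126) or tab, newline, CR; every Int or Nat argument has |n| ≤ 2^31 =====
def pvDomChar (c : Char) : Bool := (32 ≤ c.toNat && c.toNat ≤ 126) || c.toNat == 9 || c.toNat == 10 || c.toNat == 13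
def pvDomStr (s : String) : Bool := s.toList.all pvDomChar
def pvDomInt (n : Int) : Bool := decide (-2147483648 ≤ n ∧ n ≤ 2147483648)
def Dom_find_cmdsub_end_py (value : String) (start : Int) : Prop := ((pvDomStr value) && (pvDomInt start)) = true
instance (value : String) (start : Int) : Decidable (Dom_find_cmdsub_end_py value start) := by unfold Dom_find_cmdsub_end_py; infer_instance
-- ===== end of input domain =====

-- B replaces A's recursion on nested $( … ) by one iterative loop with an explicit stack of
-- suspended scanner states, a quote-mode variable dispatched at the top of the loop instead
-- of two boolean flags, and a shared keyword helper (objective: alternative).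

-- A's scanner state: depth, in_single, in_double, case_depth, in_case_patterns.
structure PvFrame where
  d : Int
  sq : Bool
  dq : Bool
  cd : Int
  icp : Bool
deriving DecidableEq, Repr

-- Result of a scan: out = fuel exhausted (never happens with the fuel the ports pass),
-- err = IndexError (value[i] out of range, excluded by Pre_), ret j = normal return.
inductive PvRes where
  | out : PvRes
  | err : PvRes
  | ret : Int → PvRes
deriving DecidableEq, Repr

def pvBind (r : PvRes) (k : Int → PvRes) : PvRes :=
  match r with
  | .out => .out
  | .err => .err
  | .ret j => k j

-- ===== PORT A =====
-- A's helper _is_word_boundary, A's early-return if-chain.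
-- pyGetD's default is never read on reachable calls: the guards 'pos > 0' (with pos < len)
-- and 'pos + wlen < len' (with pos + wlen ≥ -len) put the index in range, so this is exact.
def pv_is_word_boundary (s : List Char) (pos wlen : Int) : Bool :=
  if 0 < pos ∧ PySem.Chars.isalnum (PySem.List.pyGetD s (pos - 1) ' ') then false
  else if pos + wlen < (s.length : Int) ∧ PySem.Chars.isalnum (PySem.List.pyGetD s (pos + wlen) ' ') then false
  else true

-- literal port of A's while loop; each 'continue' is a recursive call, the nested
-- command substitution is A's recursive call to itself.
def pvGoA (cs : List Char) (fuel : Nat) (i : Int) (fr : PvFrame) : PvRes :=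
  match fuel with
  | 0 => .out
  | f + 1 =>
    if i < (cs.length : Int) ∧ 0 < fr.d then
      match PySem.List.pyGet? cs i with
      | none => .err
      | some c =>
        if c = '\\' ∧ i + 1 < (cs.length : Int) ∧ fr.sq = false then
          pvGoA cs f (i + 2) fr
        else if c = '\'' ∧ fr.dq = false then
          pvGoA cs f (i + 1) { fr with sq := !fr.sq }
        else if c = '"' ∧ fr.sq = false then
          pvGoA cs f (i + 1) { fr with dq := !fr.dq }
        else if fr.sq then
          pvGoA cs f (i + 1) fr
        else if fr.dq then
          if PySem.List.slice cs (some i) (some (i + 2)) = ['$', '('] ∧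
             PySem.List.slice cs (some i) (some (i + 3)) ≠ ['$', '(', '('] then
            pvBind (pvGoA cs f (i + 2) ⟨1, false, false, 0, false⟩) (fun j => pvGoA cs f j fr)
          else
            pvGoA cs f (i + 1) fr
        else if PySem.List.slice cs (some i) (some (i + 4)) = ['c', 'a', 's', 'e'] ∧
                pv_is_word_boundary cs i 4 then
          pvGoA cs f (i + 4) { fr with cd := fr.cd + 1, icp := false }
        else if 0 < fr.cd ∧ PySem.List.slice cs (some i) (some (i + 2)) = ['i', 'n'] ∧
                pv_is_word_boundary cs i 2 then
          pvGoA cs f (i + 2) { fr with icp := true }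
        else if PySem.List.slice cs (some i) (some (i + 4)) = ['e', 's', 'a', 'c'] ∧
                pv_is_word_boundary cs i 4 then
          if 0 < fr.cd then pvGoA cs f (i + 4) { fr with cd := fr.cd - 1, icp := false }
          else pvGoA cs f (i + 4) fr
        else if PySem.List.slice cs (some i) (some (i + 2)) = [';', ';'] then
          pvGoA cs f (i + 2) fr
        else if c = '(' then
          pvGoA cs f (i + 1) { fr with d := fr.d + 1 }
        else if c = ')' then
          if fr.icp ∧ 0 < fr.cd then pvGoA cs f (i + 1) fr
          else pvGoA cs f (i + 1) { fr with d := fr.d - 1 }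
        else
          pvGoA cs f (i + 1) fr
    else .ret i

def find_cmdsub_end_py (value : String) (start : Int) : Int :=
  let cs := value.toList
  match pvGoA cs (2 * ((cs.length : Int) - start).toNat + 1) start ⟨1, false, false, 0, false⟩ with
  | .ret j => j
  | _ => 0

-- ===== PORT B =====
-- B's quote mode: 0 = unquoted, 1 = single quotes, 2 = double quotes.
inductive PvMode where
  | norm : PvMode
  | sq : PvMode
  | dq : PvMode
deriving DecidableEq, Repr

-- B's _is_word_boundary (single boolean expression).
def pv_boundary (s : List Char) (pos wlen : Int) : Bool :=
  !(decide (0 < pos) && PySem.Chars.isalnum (PySem.List.pyGetD s (pos - 1) ' ')) &&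
  !(decide (pos + wlen < (s.length : Int)) && PySem.Chars.isalnum (PySem.List.pyGetD s (pos + wlen) ' '))

-- B's _lookahead helper.
def pv_look (xs : List Char) (k : Int) (w : List Char) : Bool :=
  decide (PySem.List.slice xs (some k) (some (k + (w.length : Int))) = w)

-- B's _kw helper.
def pv_kw (xs : List Char) (k : Int) (w : List Char) : Bool :=
  pv_look xs k w && pv_boundary xs k (w.length : Int)

-- port of B's single while loop over (i, depth, case_depth, patt, mode, stack).
def pvGoB (xs : List Char) (fuel : Nat) (k d cd : Int) (patt : Bool) (mode : PvMode)
    (stack : List (Int × Int × Bool × PvMode)) : PvRes :=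
  match fuel with
  | 0 => .out
  | f + 1 =>
    if (xs.length : Int) ≤ k ∨ d ≤ 0 then
      match stack with
      | [] => .ret k
      | (d', cd', p', m') :: rest => pvGoB xs f k d' cd' p' m' rest
    else
      match PySem.List.pyGet? xs k with
      | none => .err
      | some ch =>
        match mode with
        | .sq => pvGoB xs f (k + 1) d cd patt (if ch = '\'' then .norm else .sq) stack
        | .dq =>
          if ch = '"' then pvGoB xs f (k + 1) d cd patt .norm stack
          else if ch = '\\' ∧ k + 1 < (xs.length : Int) then pvGoB xs f (k + 2) d cd patt .dq stack
          else if pv_look xs k ['$', '('] && !pv_look xs k ['$', '(', '('] then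
            pvGoB xs f (k + 2) 1 0 false .norm ((d, cd, patt, PvMode.dq) :: stack)
          else pvGoB xs f (k + 1) d cd patt .dq stack
        | .norm =>
          if ch = '\\' ∧ k + 1 < (xs.length : Int) then pvGoB xs f (k + 2) d cd patt .norm stack
          else if ch = '\'' then pvGoB xs f (k + 1) d cd patt .sq stack
          else if ch = '"' then pvGoB xs f (k + 1) d cd patt .dq stack
          else if pv_kw xs k ['c', 'a', 's', 'e'] then pvGoB xs f (k + 4) d (cd + 1) false .norm stack
          else if 0 < cd ∧ pv_kw xs k ['i', 'n'] then pvGoB xs f (k + 2) d cd true .norm stack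
          else if pv_kw xs k ['e', 's', 'a', 'c'] then
            if 0 < cd then pvGoB xs f (k + 4) d (cd - 1) false .norm stack
            else pvGoB xs f (k + 4) d cd patt .norm stack
          else if pv_look xs k [';', ';'] then
            pvGoB xs f (k + 2) d cd patt .norm stack
          else if ch = '(' then pvGoB xs f (k + 1) (d + 1) cd patt .norm stack
          else if ch = ')' then
            if patt ∧ 0 < cd then pvGoB xs f (k + 1) d cd patt .norm stack
            else pvGoB xs f (k + 1) (d - 1) cd patt .norm stack
          else pvGoB xs f (k + 1) d cd patt .norm stack

def find_cmdsub_end_py_alt (value : String) (start : Int) : Int :=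
  let cs := value.toList
  match pvGoB cs (2 * ((cs.length : Int) - start).toNat + 1) start 1 0 false .norm [] with
  | .out => 0
  | .err => 0
  | .ret j => j

-- ===== PRECONDITION & SPEC =====
-- Pre_ excludes exactly the inputs where Python A raises IndexError: start below
-- -len(value) (value[start] is out of range even for Python's negative indexing).
def Pre_find_cmdsub_end_py (value : String) (start : Int) : Prop :=
  -(value.toList.length : Int) ≤ start
instance (value : String) (start : Int) : Decidable (Pre_find_cmdsub_end_py value start) := by
  unfold Pre_find_cmdsub_end_py; infer_instance

def pvWitness_find_cmdsub_end_py : String × Int := ("echo a); x", 0)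

def Spec_find_cmdsub_end_py (value : String) (start : Int) (out : Int) : Prop := out = find_cmdsub_end_py_alt value start
instance (value : String) (start : Int) (out : Int) : Decidable (Spec_find_cmdsub_end_py value start out) := by unfold Spec_find_cmdsub_end_py; infer_instance

-- ===== CLAIM (what is proved, stated in full; the proofs are below) =====
def Claim_equal_find_cmdsub_end_py : Prop := ∀ (value : String) (start : Int), Dom_find_cmdsub_end_py value start → Pre_find_cmdsub_end_py value start → Spec_find_cmdsub_end_py value start (find_cmdsub_end_py value start)

-- ===== LEMMAS AND PROOFS =====

-- proof-only: A-shaped one-character transition, shared vocabulary between the two ports.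
def pvScanChar (cs : List Char) (i : Int) (fr : PvFrame) (c : Char) : Option PvFrame × Int × PvFrame :=
  if c = '\\' ∧ i + 1 < (cs.length : Int) ∧ fr.sq = false then
    (none, i + 2, fr)
  else if c = '\'' ∧ fr.dq = false then
    (none, i + 1, { fr with sq := !fr.sq })
  else if c = '"' ∧ fr.sq = false then
    (none, i + 1, { fr with dq := !fr.dq })
  else if fr.sq = true ∨ (fr.dq = true ∧
          ¬ (PySem.List.slice cs (some i) (some (i + 2)) = ['$', '('] ∧
             PySem.List.slice cs (some i) (some (i + 3)) ≠ ['$', '(', '('])) then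
    (none, i + 1, fr)
  else if fr.dq then
    (some fr, i + 2, ⟨1, false, false, 0, false⟩)
  else if PySem.List.slice cs (some i) (some (i + 4)) = ['c', 'a', 's', 'e'] ∧
          pv_is_word_boundary cs i 4 then
    (none, i + 4, { fr with cd := fr.cd + 1, icp := false })
  else if 0 < fr.cd ∧ PySem.List.slice cs (some i) (some (i + 2)) = ['i', 'n'] ∧
          pv_is_word_boundary cs i 2 then
    (none, i + 2, { fr with icp := true })
  else if PySem.List.slice cs (some i) (some (i + 4)) = ['e', 's', 'a', 'c'] ∧
          pv_is_word_boundary cs i 4 then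
    if 0 < fr.cd then (none, i + 4, { fr with cd := fr.cd - 1, icp := false })
    else (none, i + 4, fr)
  else if PySem.List.slice cs (some i) (some (i + 2)) = [';', ';'] then
    (none, i + 2, fr)
  else if c = '(' then
    (none, i + 1, { fr with d := fr.d + 1 })
  else if c = ')' ∧ ¬ (fr.icp = true ∧ 0 < fr.cd) then
    (none, i + 1, { fr with d := fr.d - 1 })
  else
    (none, i + 1, fr)

def pvScanStep (cs : List Char) (i : Int) (fr : PvFrame) : Option (Option PvFrame × Int × PvFrame) :=
  match PySem.List.pyGet? cs i with
  | none => none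
  | some c => some (pvScanChar cs i fr c)

-- proof-only: B's loop re-expressed on PvFrame through pvScanStep.
def pvGoBS (cs : List Char) (fuel : Nat) (i : Int) (fr : PvFrame) (stack : List PvFrame) : PvRes :=
  match fuel with
  | 0 => .out
  | f + 1 =>
    if i < (cs.length : Int) ∧ 0 < fr.d then
      match pvScanStep cs i fr with
      | none => .err
      | some (none, i', fr') => pvGoBS cs f i' fr' stack
      | some (some pfr, i', fr') => pvGoBS cs f i' fr' (pfr :: stack)
    else
      match stack with
      | [] => .ret i
      | fr' :: s' => pvGoBS cs f i fr' s'

-- encoding of A's frame into B's state shape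
def pvEncM (fr : PvFrame) : PvMode :=
  if fr.sq then .sq else if fr.dq then .dq else .norm

def pvEnc (fr : PvFrame) : Int × Int × Bool × PvMode :=
  (fr.d, fr.cd, fr.icp, pvEncM fr)

-- resuming the suspended frames of a stack, each with fuel F (proof-only device)
def pvResume (cs : List Char) (F : Nat) (j : Int) : List PvFrame → PvRes
  | [] => .ret j
  | fr :: s => pvBind (pvGoA cs F j fr) (fun j' => pvResume cs F j' s)

theorem pv_boundary_eq (s : List Char) (pos wlen : Int) :
    pv_boundary s pos wlen = pv_is_word_boundary s pos wlen := by
  unfold pv_boundary pv_is_word_boundary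
  split_ifs with h1 h2 <;> simp_all
  constructor
  · by_cases hp : 0 < pos
    · exact Or.inr (h1 hp)
    · exact Or.inl (by omega)
  · by_cases hp : pos + wlen < (s.length : Int)
    · exact Or.inr (h2 hp)
    · exact Or.inl (by omega)

theorem pvScanChar_lt {cs : List Char} {i : Int} {fr : PvFrame} {c : Char} :
    i < (pvScanChar cs i fr c).2.1 := by
  unfold pvScanChar
  by_cases h1 : c = '\\' ∧ i + 1 < (cs.length : Int) ∧ fr.sq = false
  · rw [if_pos h1]; show i < i + 2; omega
  rw [if_neg h1]
  by_cases h2 : c = '\'' ∧ fr.dq = false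
  · rw [if_pos h2]; show i < i + 1; omega
  rw [if_neg h2]
  by_cases h3 : c = '"' ∧ fr.sq = false
  · rw [if_pos h3]; show i < i + 1; omega
  rw [if_neg h3]
  by_cases h4 : fr.sq = true ∨ (fr.dq = true ∧
      ¬ (PySem.List.slice cs (some i) (some (i + 2)) = ['$', '('] ∧
         PySem.List.slice cs (some i) (some (i + 3)) ≠ ['$', '(', '(']))
  · rw [if_pos h4]; show i < i + 1; omega
  rw [if_neg h4]
  by_cases h5 : fr.dq = true
  · rw [if_pos h5]; show i < i + 2; omega
  rw [if_neg h5]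
  by_cases h6 : PySem.List.slice cs (some i) (some (i + 4)) = ['c', 'a', 's', 'e'] ∧
      pv_is_word_boundary cs i 4 = true
  · rw [if_pos h6]; show i < i + 4; omega
  rw [if_neg h6]
  by_cases h7 : 0 < fr.cd ∧ PySem.List.slice cs (some i) (some (i + 2)) = ['i', 'n'] ∧
      pv_is_word_boundary cs i 2 = true
  · rw [if_pos h7]; show i < i + 2; omega
  rw [if_neg h7]
  by_cases h8 : PySem.List.slice cs (some i) (some (i + 4)) = ['e', 's', 'a', 'c'] ∧
      pv_is_word_boundary cs i 4 = true
  · rw [if_pos h8]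
    by_cases h8a : 0 < fr.cd
    · rw [if_pos h8a]; show i < i + 4; omega
    · rw [if_neg h8a]; show i < i + 4; omega
  rw [if_neg h8]
  by_cases h9 : PySem.List.slice cs (some i) (some (i + 2)) = [';', ';']
  · rw [if_pos h9]; show i < i + 2; omega
  rw [if_neg h9]
  by_cases h10 : c = '('
  · rw [if_pos h10]; show i < i + 1; omega
  rw [if_neg h10]
  by_cases h11 : c = ')' ∧ ¬ (fr.icp = true ∧ 0 < fr.cd)
  · rw [if_pos h11]; show i < i + 1; omega
  rw [if_neg h11]; show i < i + 1; omega

theorem pvScanStep_lt {cs : List Char} {i : Int} {fr : PvFrame} {st : Option PvFrame} {i' : Int}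
    {fr' : PvFrame} (h : pvScanStep cs i fr = some (st, i', fr')) : i < i' := by
  unfold pvScanStep at h
  rcases hg : PySem.List.pyGet? cs i with _ | c <;> rw [hg] at h
  · exact absurd h (by simp)
  · replace h := Option.some.inj h
    have hlt : i < (pvScanChar cs i fr c).2.1 := pvScanChar_lt
    rw [h] at hlt; exact hlt

-- A's one-step unfolding, phrased through the shared step function
theorem pvStepA' {cs : List Char} {f : Nat} {i : Int} {fr : PvFrame} {st : Option PvFrame}
    {i' : Int} {fr' : PvFrame} (h0 : i < (cs.length : Int) ∧ 0 < fr.d)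
    (hs : pvScanStep cs i fr = some (st, i', fr')) :
    pvGoA cs (f + 1) i fr =
      match st with
      | none => pvGoA cs f i' fr'
      | some pfr =>
          pvBind (pvGoA cs f i' fr') (fun j => pvGoA cs f j pfr) := by
  unfold pvScanStep at hs
  rw [pvGoA, if_pos h0]
  rcases hg : PySem.List.pyGet? cs i with _ | c <;> rw [hg] at hs <;> simp only [hg]
  · exact absurd hs (by simp)
  · replace hs := Option.some.inj hs
    unfold pvScanChar at hs
    by_cases h1 : c = '\\' ∧ i + 1 < (cs.length : Int) ∧ fr.sq = false
    · rw [if_pos h1] at hs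
      injection hs with hst hs; injection hs with hi hf; subst hst; subst hi; subst hf
      rw [if_pos h1]
    rw [if_neg h1] at hs ⊢
    by_cases h2 : c = '\'' ∧ fr.dq = false
    · rw [if_pos h2] at hs
      injection hs with hst hs; injection hs with hi hf; subst hst; subst hi; subst hf
      rw [if_pos h2]
    rw [if_neg h2] at hs ⊢
    by_cases h3 : c = '"' ∧ fr.sq = false
    · rw [if_pos h3] at hs
      injection hs with hst hs; injection hs with hi hf; subst hst; subst hi; subst hf
      rw [if_pos h3]
    rw [if_neg h3] at hs ⊢
    by_cases hsq : fr.sq = true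
    · rw [if_pos (Or.inl hsq : fr.sq = true ∨ (fr.dq = true ∧
        ¬ (PySem.List.slice cs (some i) (some (i + 2)) = ['$', '('] ∧
           PySem.List.slice cs (some i) (some (i + 3)) ≠ ['$', '(', '('])))] at hs
      injection hs with hst hs; injection hs with hi hf; subst hst; subst hi; subst hf
      rw [if_pos hsq]
    rw [if_neg hsq]
    by_cases hdq : fr.dq = true
    · by_cases hnest : PySem.List.slice cs (some i) (some (i + 2)) = ['$', '('] ∧
          PySem.List.slice cs (some i) (some (i + 3)) ≠ ['$', '(', '(']
      · rw [if_neg (fun hor => hor.elim hsq (fun hand => hand.2 hnest)), if_pos hdq] at hs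
        injection hs with hst hs; injection hs with hi hf; subst hst; subst hi; subst hf
        rw [if_pos hdq, if_pos hnest]
      · rw [if_pos (Or.inr ⟨hdq, hnest⟩)] at hs
        injection hs with hst hs; injection hs with hi hf; subst hst; subst hi; subst hf
        rw [if_pos hdq, if_neg hnest]
    · rw [if_neg (fun hor => hor.elim hsq (fun hand => hdq hand.1)), if_neg hdq] at hs
      rw [if_neg hdq]
      by_cases h6 : PySem.List.slice cs (some i) (some (i + 4)) = ['c', 'a', 's', 'e'] ∧
          pv_is_word_boundary cs i 4 = true
      · rw [if_pos h6] at hs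
        injection hs with hst hs; injection hs with hi hf; subst hst; subst hi; subst hf
        rw [if_pos h6]
      rw [if_neg h6] at hs ⊢
      by_cases h7 : 0 < fr.cd ∧ PySem.List.slice cs (some i) (some (i + 2)) = ['i', 'n'] ∧
          pv_is_word_boundary cs i 2 = true
      · rw [if_pos h7] at hs
        injection hs with hst hs; injection hs with hi hf; subst hst; subst hi; subst hf
        rw [if_pos h7]
      rw [if_neg h7] at hs ⊢
      by_cases h8 : PySem.List.slice cs (some i) (some (i + 4)) = ['e', 's', 'a', 'c'] ∧
          pv_is_word_boundary cs i 4 = true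
      · rw [if_pos h8] at hs ⊢
        by_cases h8a : 0 < fr.cd
        · rw [if_pos h8a] at hs ⊢
          injection hs with hst hs; injection hs with hi hf; subst hst; subst hi; subst hf
          rfl
        · rw [if_neg h8a] at hs ⊢
          injection hs with hst hs; injection hs with hi hf; subst hst; subst hi; subst hf
          rfl
      rw [if_neg h8] at hs ⊢
      by_cases h9 : PySem.List.slice cs (some i) (some (i + 2)) = [';', ';']
      · rw [if_pos h9] at hs
        injection hs with hst hs; injection hs with hi hf; subst hst; subst hi; subst hf
        rw [if_pos h9]
      rw [if_neg h9] at hs ⊢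
      by_cases h10 : c = '('
      · rw [if_pos h10] at hs
        injection hs with hst hs; injection hs with hi hf; subst hst; subst hi; subst hf
        rw [if_pos h10]
      rw [if_neg h10] at hs ⊢
      by_cases hr : c = ')'
      · by_cases hic : fr.icp = true ∧ 0 < fr.cd
        · rw [if_neg (fun hand => hand.2 hic)] at hs
          injection hs with hst hs; injection hs with hi hf; subst hst; subst hi; subst hf
          rw [if_pos hr, if_pos hic]
        · rw [if_pos ⟨hr, hic⟩] at hs
          injection hs with hst hs; injection hs with hi hf; subst hst; subst hi; subst hf
          rw [if_pos hr, if_neg hic]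
      · rw [if_neg (fun hand => hr hand.1)] at hs
        injection hs with hst hs; injection hs with hi hf; subst hst; subst hi; subst hf
        rw [if_neg hr]

theorem pvStepA_cont {cs : List Char} {f : Nat} {i i' : Int} {fr fr' : PvFrame}
    (h0 : i < (cs.length : Int) ∧ 0 < fr.d)
    (hs : pvScanStep cs i fr = some (none, i', fr')) :
    pvGoA cs (f + 1) i fr = pvGoA cs f i' fr' := pvStepA' h0 hs

theorem pvStepA_push {cs : List Char} {f : Nat} {i i' : Int} {fr fr' pfr : PvFrame}
    (h0 : i < (cs.length : Int) ∧ 0 < fr.d)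
    (hs : pvScanStep cs i fr = some (some pfr, i', fr')) :
    pvGoA cs (f + 1) i fr =
      pvBind (pvGoA cs f i' fr') (fun j => pvGoA cs f j pfr) := pvStepA' h0 hs

theorem pvStepA_err {cs : List Char} {f : Nat} {i : Int} {fr : PvFrame}
    (h0 : i < (cs.length : Int) ∧ 0 < fr.d) (hs : pvScanStep cs i fr = none) :
    pvGoA cs (f + 1) i fr = .err := by
  unfold pvScanStep at hs
  rw [pvGoA, if_pos h0]
  rcases hg : PySem.List.pyGet? cs i with _ | c <;> rw [hg] at hs <;> simp only [hg]
  exact absurd hs (by simp)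

theorem pvStepA_ret {cs : List Char} {f : Nat} {i : Int} {fr : PvFrame}
    (h0 : ¬ (i < (cs.length : Int) ∧ 0 < fr.d)) :
    pvGoA cs (f + 1) i fr = .ret i := by
  rw [pvGoA, if_neg h0]

-- one-step unfoldings of the frame-level loop
theorem pvGoBS_cont {cs : List Char} {f : Nat} {i i' : Int} {fr fr' : PvFrame} {s : List PvFrame}
    (h0 : i < (cs.length : Int) ∧ 0 < fr.d)
    (hs : pvScanStep cs i fr = some (none, i', fr')) :
    pvGoBS cs (f + 1) i fr s = pvGoBS cs f i' fr' s := by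
  rcases s with _ | ⟨a, s⟩
  · rw [pvGoBS.eq_2, if_pos h0, hs]
  · rw [pvGoBS.eq_3, if_pos h0, hs]

theorem pvGoBS_push {cs : List Char} {f : Nat} {i i' : Int} {fr fr' pfr : PvFrame}
    {s : List PvFrame} (h0 : i < (cs.length : Int) ∧ 0 < fr.d)
    (hs : pvScanStep cs i fr = some (some pfr, i', fr')) :
    pvGoBS cs (f + 1) i fr s = pvGoBS cs f i' fr' (pfr :: s) := by
  rcases s with _ | ⟨a, s⟩
  · rw [pvGoBS.eq_2, if_pos h0, hs]
  · rw [pvGoBS.eq_3, if_pos h0, hs]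

theorem pvGoBS_step_err {cs : List Char} {f : Nat} {i : Int} {fr : PvFrame} {s : List PvFrame}
    (h0 : i < (cs.length : Int) ∧ 0 < fr.d) (hs : pvScanStep cs i fr = none) :
    pvGoBS cs (f + 1) i fr s = .err := by
  rcases s with _ | ⟨a, s⟩
  · rw [pvGoBS.eq_2, if_pos h0, hs]
  · rw [pvGoBS.eq_3, if_pos h0, hs]

theorem pvGoBS_ret {cs : List Char} {f : Nat} {i : Int} {fr : PvFrame}
    (h0 : ¬ (i < (cs.length : Int) ∧ 0 < fr.d)) :
    pvGoBS cs (f + 1) i fr [] = .ret i := by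
  rw [pvGoBS.eq_2, if_neg h0]

theorem pvGoBS_pop {cs : List Char} {f : Nat} {i : Int} {fr fr' : PvFrame} {s' : List PvFrame}
    (h0 : ¬ (i < (cs.length : Int) ∧ 0 < fr.d)) :
    pvGoBS cs (f + 1) i fr (fr' :: s') = pvGoBS cs f i fr' s' := by
  rw [pvGoBS.eq_3, if_neg h0]

theorem pvGoA_ge {cs : List Char} {f : Nat} {i j : Int} {fr : PvFrame}
    (h : pvGoA cs f i fr = .ret j) : i ≤ j := by
  induction f generalizing i fr j with
  | zero => exact absurd h (by rw [pvGoA]; simp)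
  | succ f ih =>
    by_cases h0 : i < (cs.length : Int) ∧ 0 < fr.d
    · rcases hsc : pvScanStep cs i fr with _ | ⟨st, i', fr'⟩
      · rw [pvStepA_err h0 hsc] at h; cases h
      · have hlt := pvScanStep_lt hsc
        rcases st with _ | pfr
        · rw [pvStepA_cont h0 hsc] at h
          have := ih h; omega
        · rw [pvStepA_push h0 hsc] at h
          rcases hA : pvGoA cs f i' fr' with _ | _ | j1 <;> rw [hA] at h <;>
            simp only [pvBind] at h
          · cases h
          · cases h
          · have h1 := ih hA
            have h2 := ih h
            omega
    · rw [pvStepA_ret h0] at h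
      injection h with h
      omega

theorem pvGoA_mono {cs : List Char} {f f' : Nat} {i : Int} {fr : PvFrame}
    (hle : f ≤ f') (h : pvGoA cs f i fr ≠ .out) : pvGoA cs f' i fr = pvGoA cs f i fr := by
  induction f generalizing f' i fr with
  | zero => exact absurd (by rw [pvGoA]) h
  | succ f ih =>
    obtain ⟨f'', rfl⟩ : ∃ k, f' = k + 1 := ⟨f' - 1, by omega⟩
    have hle' : f ≤ f'' := by omega
    by_cases h0 : i < (cs.length : Int) ∧ 0 < fr.d
    · rcases hsc : pvScanStep cs i fr with _ | ⟨st, i', fr'⟩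
      · rw [pvStepA_err h0 hsc, pvStepA_err h0 hsc]
      · rcases st with _ | pfr
        · rw [pvStepA_cont h0 hsc] at h
          rw [pvStepA_cont h0 hsc, pvStepA_cont h0 hsc]
          exact ih hle' h
        · rw [pvStepA_push h0 hsc] at h
          rw [pvStepA_push h0 hsc, pvStepA_push h0 hsc]
          rcases hA : pvGoA cs f i' fr' with _ | _ | j1
          · rw [hA] at h; simp [pvBind] at h
          · rw [ih hle' (by rw [hA]; simp), hA]; simp [pvBind]
          · rw [ih hle' (by rw [hA]; simp), hA]
            rw [hA] at h
            simp only [pvBind] at h ⊢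
            exact ih hle' h
    · rw [pvStepA_ret h0, pvStepA_ret h0]

theorem pvGoA_suff {cs : List Char} {f : Nat} {i : Int} {fr : PvFrame}
    (h : ((cs.length : Int) - i).toNat < f) : pvGoA cs f i fr ≠ .out := by
  induction f generalizing i fr with
  | zero => omega
  | succ f ih =>
    by_cases h0 : i < (cs.length : Int) ∧ 0 < fr.d
    · rcases hsc : pvScanStep cs i fr with _ | ⟨st, i', fr'⟩
      · rw [pvStepA_err h0 hsc]; simp
      · have hlt := pvScanStep_lt hsc
        have hch : ((cs.length : Int) - i').toNat < f := by omega
        rcases st with _ | pfr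
        · rw [pvStepA_cont h0 hsc]
          exact ih hch
        · rw [pvStepA_push h0 hsc]
          rcases hA : pvGoA cs f i' fr' with _ | _ | j1
          · exact absurd hA (ih hch)
          · simp [pvBind]
          · simp only [pvBind]
            have hj : i' ≤ j1 := pvGoA_ge hA
            exact ih (by omega)
    · rw [pvStepA_ret h0]; simp

theorem pvResume_mono {cs : List Char} {F F' : Nat} {j : Int} {s : List PvFrame}
    (hle : F ≤ F') (h : pvResume cs F j s ≠ .out) : pvResume cs F' j s = pvResume cs F j s := by
  induction s generalizing j with
  | nil => rfl
  | cons fr s ih =>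
    simp only [pvResume] at h ⊢
    rcases hA : pvGoA cs F j fr with _ | _ | j1
    · rw [hA] at h; simp [pvBind] at h
    · rw [pvGoA_mono hle (by rw [hA]; simp), hA]; simp [pvBind]
    · rw [pvGoA_mono hle (by rw [hA]; simp), hA]
      rw [hA] at h
      simp only [pvBind] at h ⊢
      exact ih h

theorem pvGoBS_suff {cs : List Char} {f : Nat} {i : Int} {fr : PvFrame} {s : List PvFrame}
    (h : 2 * ((cs.length : Int) - i).toNat + s.length < f) : pvGoBS cs f i fr s ≠ .out := by
  induction f generalizing i fr s with
  | zero => omega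
  | succ f ih =>
    by_cases h0 : i < (cs.length : Int) ∧ 0 < fr.d
    · rcases hsc : pvScanStep cs i fr with _ | ⟨st, i', fr'⟩
      · rw [pvGoBS_step_err h0 hsc]; simp
      · have hlt := pvScanStep_lt hsc
        rcases st with _ | pfr
        · rw [pvGoBS_cont h0 hsc]
          exact ih (by omega)
        · rw [pvGoBS_push h0 hsc]
          exact ih (by simp; omega)
    · rcases s with _ | ⟨fr', s'⟩
      · rw [pvGoBS_ret h0]; simp
      · rw [pvGoBS_pop h0]
        exact ih (by simp at h ⊢; omega)

theorem pvSim {cs : List Char} (f : Nat) : ∀ {F : Nat} {i : Int} {fr : PvFrame} {s : List PvFrame},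
    f ≤ F → pvGoBS cs f i fr s ≠ .out →
    pvGoBS cs f i fr s = pvBind (pvGoA cs F i fr) (fun j => pvResume cs F j s) := by
  induction f with
  | zero => intro F i fr s _ h; exact absurd (by rw [pvGoBS]) h
  | succ f ih =>
    intro F i fr s hle h
    obtain ⟨F'', rfl⟩ : ∃ k, F = k + 1 := ⟨F - 1, by omega⟩
    have hle' : f ≤ F'' := by omega
    by_cases h0 : i < (cs.length : Int) ∧ 0 < fr.d
    · rcases hsc : pvScanStep cs i fr with _ | ⟨st, i', fr'⟩
      · rw [pvGoBS_step_err h0 hsc, pvStepA_err h0 hsc]; rfl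
      · rcases st with _ | pfr
        · rw [pvGoBS_cont h0 hsc] at h ⊢
          rw [pvStepA_cont h0 hsc]
          have hB := ih hle' h
          rw [hB] at h ⊢
          rcases hA : pvGoA cs F'' i' fr' with _ | _ | j1
          · rfl
          · rfl
          · rw [hA] at h
            simp only [pvBind] at h ⊢
            exact (pvResume_mono (Nat.le_succ F'') h).symm
        · rw [pvGoBS_push h0 hsc] at h ⊢
          rw [pvStepA_push h0 hsc]
          have hB := ih hle' h
          rw [hB] at h ⊢
          rcases hA : pvGoA cs F'' i' fr' with _ | _ | j1
          · rfl
          · rfl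
          · rw [hA] at h
            simp only [pvBind, pvResume] at h ⊢
            rcases hA2 : pvGoA cs F'' j1 pfr with _ | _ | j2
            · rw [hA2] at h
            · rfl
            · rw [hA2] at h
              simp only [pvBind] at h ⊢
              exact (pvResume_mono (Nat.le_succ F'') h).symm
    · rcases s with _ | ⟨fr'', s'⟩
      · rw [pvGoBS_ret h0, pvStepA_ret h0]; rfl
      · rw [pvGoBS_pop h0] at h ⊢
        rw [pvStepA_ret h0]
        have hB := ih hle' h
        rw [hB] at h ⊢
        simp only [pvBind, pvResume] at h ⊢
        rcases hA : pvGoA cs F'' i fr'' with _ | _ | j1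
        · rw [hA] at h; simp [pvBind] at h
        · rw [pvGoA_mono (Nat.le_succ F'') (by rw [hA]; simp), hA]
        · rw [pvGoA_mono (Nat.le_succ F'') (by rw [hA]; simp), hA]
          rw [hA] at h
          simp only [pvBind] at h ⊢
          exact (pvResume_mono (Nat.le_succ F'') h).symm

theorem pvScanChar_props {cs : List Char} {i : Int} {fr : PvFrame} {c : Char}
    {p : Option PvFrame} {i' : Int} {fr' : PvFrame}
    (hsc : pvScanChar cs i fr c = (p, i', fr')) (hv : (fr.sq && fr.dq) = false) :
    ((fr'.sq && fr'.dq) = false) ∧ (∀ q, p = some q → q = fr) := by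
  unfold pvScanChar at hsc
  by_cases h1 : c = '\\' ∧ i + 1 < (cs.length : Int) ∧ fr.sq = false
  · rw [if_pos h1] at hsc
    injection hsc with hp h; injection h with hi hf; subst hp; subst hf
    exact ⟨hv, fun q hq => by cases hq⟩
  rw [if_neg h1] at hsc
  by_cases h2 : c = '\'' ∧ fr.dq = false
  · rw [if_pos h2] at hsc
    injection hsc with hp h; injection h with hi hf; subst hp; subst hf
    refine ⟨?_, fun q hq => by cases hq⟩
    show (!fr.sq && fr.dq) = false
    rw [h2.2]; simp
  rw [if_neg h2] at hsc
  by_cases h3 : c = '"' ∧ fr.sq = false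
  · rw [if_pos h3] at hsc
    injection hsc with hp h; injection h with hi hf; subst hp; subst hf
    refine ⟨?_, fun q hq => by cases hq⟩
    show (fr.sq && !fr.dq) = false
    rw [h3.2]; simp
  rw [if_neg h3] at hsc
  by_cases h4 : fr.sq = true ∨ (fr.dq = true ∧
      ¬ (PySem.List.slice cs (some i) (some (i + 2)) = ['$', '('] ∧
         PySem.List.slice cs (some i) (some (i + 3)) ≠ ['$', '(', '(']))
  · rw [if_pos h4] at hsc
    injection hsc with hp h; injection h with hi hf; subst hp; subst hf
    exact ⟨hv, fun q hq => by cases hq⟩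
  rw [if_neg h4] at hsc
  by_cases h5 : fr.dq = true
  · rw [if_pos h5] at hsc
    injection hsc with hp h; injection h with hi hf; subst hp; subst hf
    exact ⟨rfl, fun q hq => (Option.some.inj hq).symm⟩
  rw [if_neg h5] at hsc
  by_cases h6 : PySem.List.slice cs (some i) (some (i + 4)) = ['c', 'a', 's', 'e'] ∧
      pv_is_word_boundary cs i 4 = true
  · rw [if_pos h6] at hsc
    injection hsc with hp h; injection h with hi hf; subst hp; subst hf
    exact ⟨hv, fun q hq => by cases hq⟩
  rw [if_neg h6] at hsc
  by_cases h7 : 0 < fr.cd ∧ PySem.List.slice cs (some i) (some (i + 2)) = ['i', 'n'] ∧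
      pv_is_word_boundary cs i 2 = true
  · rw [if_pos h7] at hsc
    injection hsc with hp h; injection h with hi hf; subst hp; subst hf
    exact ⟨hv, fun q hq => by cases hq⟩
  rw [if_neg h7] at hsc
  by_cases h8 : PySem.List.slice cs (some i) (some (i + 4)) = ['e', 's', 'a', 'c'] ∧
      pv_is_word_boundary cs i 4 = true
  · rw [if_pos h8] at hsc
    by_cases h8a : 0 < fr.cd
    · rw [if_pos h8a] at hsc
      injection hsc with hp h; injection h with hi hf; subst hp; subst hf
      exact ⟨hv, fun q hq => by cases hq⟩
    · rw [if_neg h8a] at hsc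
      injection hsc with hp h; injection h with hi hf; subst hp; subst hf
      exact ⟨hv, fun q hq => by cases hq⟩
  rw [if_neg h8] at hsc
  by_cases h9 : PySem.List.slice cs (some i) (some (i + 2)) = [';', ';']
  · rw [if_pos h9] at hsc
    injection hsc with hp h; injection h with hi hf; subst hp; subst hf
    exact ⟨hv, fun q hq => by cases hq⟩
  rw [if_neg h9] at hsc
  by_cases h10 : c = '('
  · rw [if_pos h10] at hsc
    injection hsc with hp h; injection h with hi hf; subst hp; subst hf
    exact ⟨hv, fun q hq => by cases hq⟩
  rw [if_neg h10] at hsc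
  by_cases h11 : c = ')' ∧ ¬ (fr.icp = true ∧ 0 < fr.cd)
  · rw [if_pos h11] at hsc
    injection hsc with hp h; injection h with hi hf; subst hp; subst hf
    exact ⟨hv, fun q hq => by cases hq⟩
  rw [if_neg h11] at hsc
  injection hsc with hp h; injection h with hi hf; subst hp; subst hf
  exact ⟨hv, fun q hq => by cases hq⟩

-- one-step unfolding of B's loop at positive fuel
theorem pvGoB_succ (cs : List Char) (f : Nat) (i d cd : Int) (patt : Bool) (mode : PvMode)
    (stack : List (Int × Int × Bool × PvMode)) :
    pvGoB cs (f + 1) i d cd patt mode stack =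
      if (cs.length : Int) ≤ i ∨ d ≤ 0 then
        match stack with
        | [] => .ret i
        | (d', cd', p', m') :: s => pvGoB cs f i d' cd' p' m' s
      else
        match PySem.List.pyGet? cs i with
        | none => .err
        | some c =>
          match mode with
          | .sq => pvGoB cs f (i + 1) d cd patt (if c = '\'' then .norm else .sq) stack
          | .dq =>
            if c = '"' then pvGoB cs f (i + 1) d cd patt .norm stack
            else if c = '\\' ∧ i + 1 < (cs.length : Int) then pvGoB cs f (i + 2) d cd patt .dq stack
            else if pv_look cs i ['$', '('] && !pv_look cs i ['$', '(', '('] then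
              pvGoB cs f (i + 2) 1 0 false .norm ((d, cd, patt, PvMode.dq) :: stack)
            else pvGoB cs f (i + 1) d cd patt .dq stack
          | .norm =>
            if c = '\\' ∧ i + 1 < (cs.length : Int) then pvGoB cs f (i + 2) d cd patt .norm stack
            else if c = '\'' then pvGoB cs f (i + 1) d cd patt .sq stack
            else if c = '"' then pvGoB cs f (i + 1) d cd patt .dq stack
            else if pv_kw cs i ['c', 'a', 's', 'e'] then pvGoB cs f (i + 4) d (cd + 1) false .norm stack
            else if 0 < cd ∧ pv_kw cs i ['i', 'n'] then pvGoB cs f (i + 2) d cd true .norm stack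
            else if pv_kw cs i ['e', 's', 'a', 'c'] then
              if 0 < cd then pvGoB cs f (i + 4) d (cd - 1) false .norm stack
              else pvGoB cs f (i + 4) d cd patt .norm stack
            else if pv_look cs i [';', ';'] then
              pvGoB cs f (i + 2) d cd patt .norm stack
            else if c = '(' then pvGoB cs f (i + 1) (d + 1) cd patt .norm stack
            else if c = ')' then
              if patt ∧ 0 < cd then pvGoB cs f (i + 1) d cd patt .norm stack
              else pvGoB cs f (i + 1) (d - 1) cd patt .norm stack
            else pvGoB cs f (i + 1) d cd patt .norm stack := by
  rw [pvGoB.eq_def]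

theorem pv_kw_case (cs : List Char) (i : Int) :
    pv_kw cs i ['c', 'a', 's', 'e'] = true ↔
      (PySem.List.slice cs (some i) (some (i + 4)) = ['c', 'a', 's', 'e'] ∧
       pv_is_word_boundary cs i 4 = true) := by
  simp [pv_kw, pv_look, pv_boundary_eq]

theorem pv_kw_in (cs : List Char) (i : Int) :
    pv_kw cs i ['i', 'n'] = true ↔
      (PySem.List.slice cs (some i) (some (i + 2)) = ['i', 'n'] ∧
       pv_is_word_boundary cs i 2 = true) := by
  simp [pv_kw, pv_look, pv_boundary_eq]

theorem pv_kw_esac (cs : List Char) (i : Int) :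
    pv_kw cs i ['e', 's', 'a', 'c'] = true ↔
      (PySem.List.slice cs (some i) (some (i + 4)) = ['e', 's', 'a', 'c'] ∧
       pv_is_word_boundary cs i 4 = true) := by
  simp [pv_kw, pv_look, pv_boundary_eq]

theorem pv_look_nest (cs : List Char) (i : Int) :
    (pv_look cs i ['$', '('] && !pv_look cs i ['$', '(', '(']) = true ↔
      (PySem.List.slice cs (some i) (some (i + 2)) = ['$', '('] ∧
       PySem.List.slice cs (some i) (some (i + 3)) ≠ ['$', '(', '(']) := by
  simp [pv_look]

theorem pv_look_semi (cs : List Char) (i : Int) :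
    pv_look cs i [';', ';'] = true ↔
      PySem.List.slice cs (some i) (some (i + 2)) = [';', ';'] := by
  simp [pv_look]

theorem pvStepBeq {cs : List Char} {f : Nat} {i : Int} {fr : PvFrame} {c : Char}
    {S : List (Int × Int × Bool × PvMode)}
    (hv : (fr.sq && fr.dq) = false) (h0 : i < (cs.length : Int) ∧ 0 < fr.d)
    (hg : PySem.List.pyGet? cs i = some c) :
    pvGoB cs (f + 1) i fr.d fr.cd fr.icp (pvEncM fr) S =
      match pvScanChar cs i fr c with
      | (none, i', fr') => pvGoB cs f i' fr'.d fr'.cd fr'.icp (pvEncM fr') S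
      | (some q, i', fr') => pvGoB cs f i' fr'.d fr'.cd fr'.icp (pvEncM fr') (pvEnc q :: S) := by
  have hcond : ¬ ((cs.length : Int) ≤ i ∨ fr.d ≤ 0) := by omega
  rw [pvGoB_succ, if_neg hcond]
  simp only [hg]
  unfold pvScanChar
  by_cases hsq : fr.sq = true
  · have hdq : fr.dq = false := by
      cases hdqq : fr.dq
      · rfl
      · rw [hsq, hdqq] at hv; cases hv
    have hm : pvEncM fr = .sq := by simp [pvEncM, hsq]
    simp only [hm]
    have e1 : ¬ (c = '\\' ∧ i + 1 < (cs.length : Int) ∧ fr.sq = false) := fun h => by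
      rw [hsq] at h; simp at h
    rw [if_neg e1]
    by_cases hc : c = '\''
    · rw [if_pos (show c = '\'' ∧ fr.dq = false from ⟨hc, hdq⟩), if_pos hc]
      simp [pvEncM, hsq, hdq]
    · have e2 : ¬ (c = '\'' ∧ fr.dq = false) := fun h => hc h.1
      have e3 : ¬ (c = '"' ∧ fr.sq = false) := fun h => by rw [hsq] at h; simp at h
      rw [if_neg e2, if_neg e3]
      rw [if_pos (Or.inl hsq : fr.sq = true ∨ (fr.dq = true ∧
        ¬ (PySem.List.slice cs (some i) (some (i + 2)) = ['$', '('] ∧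
           PySem.List.slice cs (some i) (some (i + 3)) ≠ ['$', '(', '('])))]
      rw [if_neg hc]
      simp [pvEncM, hsq]
  · have hsq' : fr.sq = false := by
      cases h : fr.sq
      · rfl
      · exact absurd h hsq
    by_cases hdq : fr.dq = true
    · have hm : pvEncM fr = .dq := by simp [pvEncM, hsq', hdq]
      simp only [hm]
      by_cases hc1 : c = '"'
      · have e1 : ¬ (c = '\\' ∧ i + 1 < (cs.length : Int) ∧ fr.sq = false) := fun h => by
          rw [hc1] at h; simp at h
        have e2 : ¬ (c = '\'' ∧ fr.dq = false) := fun h => by rw [hdq] at h; simp at h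
        rw [if_neg e1, if_neg e2]
        rw [if_pos (show c = '"' ∧ fr.sq = false from ⟨hc1, hsq'⟩), if_pos hc1]
        simp [pvEncM, hsq', hdq]
      · by_cases hc2 : c = '\\' ∧ i + 1 < (cs.length : Int)
        · rw [if_pos (show c = '\\' ∧ i + 1 < (cs.length : Int) ∧ fr.sq = false from
            ⟨hc2.1, hc2.2, hsq'⟩)]
          rw [if_neg hc1, if_pos hc2]
          simp [pvEncM, hsq', hdq]
        · have e1 : ¬ (c = '\\' ∧ i + 1 < (cs.length : Int) ∧ fr.sq = false) :=
            fun h => hc2 ⟨h.1, h.2.1⟩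
          have e2 : ¬ (c = '\'' ∧ fr.dq = false) := fun h => by rw [hdq] at h; simp at h
          have e3 : ¬ (c = '"' ∧ fr.sq = false) := fun h => hc1 h.1
          rw [if_neg e1, if_neg e2, if_neg e3]
          by_cases hn : PySem.List.slice cs (some i) (some (i + 2)) = ['$', '('] ∧
              PySem.List.slice cs (some i) (some (i + 3)) ≠ ['$', '(', '(']
          · have e4 : ¬ (fr.sq = true ∨ (fr.dq = true ∧
                ¬ (PySem.List.slice cs (some i) (some (i + 2)) = ['$', '('] ∧
                   PySem.List.slice cs (some i) (some (i + 3)) ≠ ['$', '(', '(']))) :=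
              fun hor => hor.elim (fun hh => by rw [hsq'] at hh; simp at hh)
                (fun hand => hand.2 hn)
            rw [if_neg e4, if_pos hdq]
            rw [if_neg hc1, if_neg hc2, if_pos ((pv_look_nest cs i).mpr hn)]
            simp [pvEnc, pvEncM, hsq', hdq]
          · rw [if_pos (Or.inr ⟨hdq, hn⟩ : fr.sq = true ∨ (fr.dq = true ∧
              ¬ (PySem.List.slice cs (some i) (some (i + 2)) = ['$', '('] ∧
                 PySem.List.slice cs (some i) (some (i + 3)) ≠ ['$', '(', '('])))]
            rw [if_neg hc1, if_neg hc2,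
              if_neg (fun hb => hn ((pv_look_nest cs i).mp hb))]
            simp [pvEncM, hsq', hdq]
    · have hdq' : fr.dq = false := by
        cases h : fr.dq
        · rfl
        · exact absurd h hdq
      have hm : pvEncM fr = .norm := by simp [pvEncM, hsq', hdq']
      simp only [hm]
      by_cases h1 : c = '\\' ∧ i + 1 < (cs.length : Int)
      · rw [if_pos (show c = '\\' ∧ i + 1 < (cs.length : Int) ∧ fr.sq = false from
          ⟨h1.1, h1.2, hsq'⟩), if_pos h1]
        simp [pvEncM, hsq', hdq']
      have e1 : ¬ (c = '\\' ∧ i + 1 < (cs.length : Int) ∧ fr.sq = false) :=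
        fun h => h1 ⟨h.1, h.2.1⟩
      rw [if_neg e1, if_neg h1]
      by_cases h2 : c = '\''
      · rw [if_pos (show c = '\'' ∧ fr.dq = false from ⟨h2, hdq'⟩), if_pos h2]
        simp [pvEncM, hsq']
      have e2 : ¬ (c = '\'' ∧ fr.dq = false) := fun h => h2 h.1
      rw [if_neg e2, if_neg h2]
      by_cases h3 : c = '"'
      · rw [if_pos (show c = '"' ∧ fr.sq = false from ⟨h3, hsq'⟩), if_pos h3]
        simp [pvEncM, hsq', hdq']
      have e3 : ¬ (c = '"' ∧ fr.sq = false) := fun h => h3 h.1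
      rw [if_neg e3, if_neg h3]
      have e4 : ¬ (fr.sq = true ∨ (fr.dq = true ∧
          ¬ (PySem.List.slice cs (some i) (some (i + 2)) = ['$', '('] ∧
             PySem.List.slice cs (some i) (some (i + 3)) ≠ ['$', '(', '(']))) :=
        fun hor => hor.elim (fun hh => by rw [hsq'] at hh; simp at hh)
          (fun hand => by rw [hdq'] at hand; simp at hand)
      rw [if_neg e4]
      have e5 : ¬ (fr.dq = true) := fun hh => by rw [hdq'] at hh; simp at hh
      rw [if_neg e5]
      by_cases h6 : PySem.List.slice cs (some i) (some (i + 4)) = ['c', 'a', 's', 'e'] ∧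
          pv_is_word_boundary cs i 4 = true
      · rw [if_pos h6, if_pos ((pv_kw_case cs i).mpr h6)]
        simp [pvEncM, hsq', hdq']
      rw [if_neg h6, if_neg (show ¬ pv_kw cs i ['c', 'a', 's', 'e'] = true from
        fun hb => h6 ((pv_kw_case cs i).mp hb))]
      by_cases h7 : 0 < fr.cd ∧ PySem.List.slice cs (some i) (some (i + 2)) = ['i', 'n'] ∧
          pv_is_word_boundary cs i 2 = true
      · rw [if_pos h7, if_pos (show 0 < fr.cd ∧ pv_kw cs i ['i', 'n'] = true from
          ⟨h7.1, (pv_kw_in cs i).mpr h7.2⟩)]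
        simp [pvEncM, hsq', hdq']
      rw [if_neg h7, if_neg (show ¬ (0 < fr.cd ∧ pv_kw cs i ['i', 'n'] = true) from
        fun hb => h7 ⟨hb.1, (pv_kw_in cs i).mp hb.2⟩)]
      by_cases h8 : PySem.List.slice cs (some i) (some (i + 4)) = ['e', 's', 'a', 'c'] ∧
          pv_is_word_boundary cs i 4 = true
      · rw [if_pos h8, if_pos ((pv_kw_esac cs i).mpr h8)]
        by_cases h8a : 0 < fr.cd
        · rw [if_pos h8a, if_pos h8a]
          simp [pvEncM, hsq', hdq']
        · rw [if_neg h8a, if_neg h8a]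
          simp [pvEncM, hsq', hdq']
      rw [if_neg h8, if_neg (show ¬ pv_kw cs i ['e', 's', 'a', 'c'] = true from
        fun hb => h8 ((pv_kw_esac cs i).mp hb))]
      by_cases h9 : PySem.List.slice cs (some i) (some (i + 2)) = [';', ';']
      · rw [if_pos h9, if_pos ((pv_look_semi cs i).mpr h9)]
        simp [pvEncM, hsq', hdq']
      rw [if_neg h9, if_neg (fun hb => h9 ((pv_look_semi cs i).mp hb))]
      by_cases h10 : c = '('
      · rw [if_pos h10, if_pos h10]
        simp [pvEncM, hsq', hdq']
      rw [if_neg h10, if_neg h10]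
      by_cases hr : c = ')'
      · by_cases hic : fr.icp = true ∧ 0 < fr.cd
        · have e6 : ¬ (c = ')' ∧ ¬ (fr.icp = true ∧ 0 < fr.cd)) := fun h => h.2 hic
          rw [if_neg e6, if_pos hr, if_pos hic]
          simp [pvEncM, hsq', hdq']
        · rw [if_pos (show c = ')' ∧ ¬ (fr.icp = true ∧ 0 < fr.cd) from ⟨hr, hic⟩)]
          rw [if_pos hr, if_neg hic]
          simp [pvEncM, hsq', hdq']
      · have e6 : ¬ (c = ')' ∧ ¬ (fr.icp = true ∧ 0 < fr.cd)) := fun h => hr h.1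
        rw [if_neg e6, if_neg hr]
        simp [pvEncM, hsq', hdq']

theorem pvBridge {cs : List Char} (f : Nat) : ∀ {i : Int} {fr : PvFrame} {s : List PvFrame},
    (fr.sq && fr.dq) = false → (∀ g ∈ s, (g.sq && g.dq) = false) →
    pvGoB cs f i fr.d fr.cd fr.icp (pvEncM fr) (s.map pvEnc) = pvGoBS cs f i fr s := by
  induction f with
  | zero => intro i fr s _ _; rfl
  | succ f ih =>
    intro i fr s hv hs
    by_cases h0 : i < (cs.length : Int) ∧ 0 < fr.d
    · have hcond : ¬ ((cs.length : Int) ≤ i ∨ fr.d ≤ 0) := by omega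
      rcases hg : PySem.List.pyGet? cs i with _ | c
      · rw [pvGoBS_step_err h0 (by unfold pvScanStep; rw [hg])]
        rw [pvGoB_succ, if_neg hcond]
        simp only [hg]
      · have hstep : pvScanStep cs i fr = some (pvScanChar cs i fr c) := by
          unfold pvScanStep; rw [hg]
        rw [pvStepBeq hv h0 hg]
        rcases hsc : pvScanChar cs i fr c with ⟨p, i', fr'⟩
        obtain ⟨hv', hpush⟩ := pvScanChar_props hsc hv
        rw [hsc] at hstep
        rcases p with _ | q
        · rw [pvGoBS_cont h0 hstep]
          exact ih hv' hs
        · have hq : q = fr := hpush q rfl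
          rw [pvGoBS_push h0 hstep]
          have hmap : pvEnc q :: s.map pvEnc = (q :: s).map pvEnc := rfl
          have hs' : ∀ g ∈ q :: s, (g.sq && g.dq) = false := by
            intro g hg'
            rcases List.mem_cons.mp hg' with h | h
            · rw [h, hq]; exact hv
            · exact hs g h
          show pvGoB cs f i' fr'.d fr'.cd fr'.icp (pvEncM fr') ((q :: s).map pvEnc) =
            pvGoBS cs f i' fr' (q :: s)
          exact ih hv' hs'
    · have hcond : ((cs.length : Int) ≤ i ∨ fr.d ≤ 0) := by omega
      rcases s with _ | ⟨g, s'⟩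
      · rw [pvGoBS_ret h0, pvGoB_succ, if_pos hcond]
        simp
      · rw [pvGoBS_pop h0]
        have hun : pvGoB cs (f + 1) i fr.d fr.cd fr.icp (pvEncM fr) ((g :: s').map pvEnc) =
            pvGoB cs f i g.d g.cd g.icp (pvEncM g) (s'.map pvEnc) := by
          rw [pvGoB_succ, if_pos hcond]
          simp [pvEnc]
        rw [hun]
        exact ih (hs g (by simp)) (fun g' hg' => hs g' (by simp [hg']))

-- ===== VERDICT (by name: the statement is the Claim_ definition above) =====
theorem find_cmdsub_end_py_spec : Claim_equal_find_cmdsub_end_py := by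
  intro value start _ _
  unfold Spec_find_cmdsub_end_py find_cmdsub_end_py find_cmdsub_end_py_alt
  dsimp only
  set cs := value.toList with hcs
  set F := 2 * ((cs.length : Int) - start).toNat + 1 with hF
  have hA : pvGoA cs F start ⟨1, false, false, 0, false⟩ ≠ .out :=
    pvGoA_suff (by omega)
  have hB : pvGoBS cs F start ⟨1, false, false, 0, false⟩ [] ≠ .out :=
    pvGoBS_suff (by simp; omega)
  have hbr : pvGoB cs F start 1 0 false .norm [] =
      pvGoBS cs F start ⟨1, false, false, 0, false⟩ [] := by
    have := pvBridge (cs := cs) F (i := start) (fr := ⟨1, false, false, 0, false⟩) (s := [])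
      (by rfl) (by intro g hg; cases hg)
    simpa [pvEncM] using this
  have hsim := pvSim F (le_refl F) hB
  rw [hbr]
  rcases hg : pvGoA cs F start ⟨1, false, false, 0, false⟩ with _ | _ | j <;>
    rw [hg] at hsim
  · exact absurd hg hA
  · rw [hsim]; rfl
  · rw [hsim]; rfl
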